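-- pv_equiv track=rewrite | github.com/nahyun119/algorithm | 프로그래머스/12914.py | solution
-- ===== SOURCE A (Python) =====
-- def solution(n):
--     answer = 0
--
--     dp = [0] * (n + 2)
--
--     dp[1] = 1
--     dp[2] = 2
--
--     if n >= 3:
--         for i in range(3, n + 1):
--             dp[i] = dp[i - 1] + dp[i - 2]
--
--     answer = dp[n] % 1234567 # 나누기 잊지말아!!!
--
--     return answer
-- ===== SOURCE B (Python) =====
-- def solution(n):
--     MOD = 1234567
--
--     def fib_pair(k):
--         # returns (F(k) % MOD, F(k+1) % MOD) by fast doubling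
--         if k == 0:
--             return (0, 1)
--         a, b = fib_pair(k >> 1)
--         c = a * (2 * b - a) % MOD
--         d = (a * a + b * b) % MOD
--         if k & 1:
--             return (d, (c + d) % MOD)
--         return (c, d)
--
--     # climbing-stairs value: dp[n] = F(n+1)
--     return fib_pair(n + 1)[0]
-- ===== Notes on version B (the rewrite author's own statement) =====
-- stated objective: faster
-- what changed: Replaced the O(n) DP array that fills every Fibonacci value up to n with recursive fast-doubling that computes F(n+1) mod 1234567 in O(log n) multiplications, reducing mod at every step.
import Mathlib
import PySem

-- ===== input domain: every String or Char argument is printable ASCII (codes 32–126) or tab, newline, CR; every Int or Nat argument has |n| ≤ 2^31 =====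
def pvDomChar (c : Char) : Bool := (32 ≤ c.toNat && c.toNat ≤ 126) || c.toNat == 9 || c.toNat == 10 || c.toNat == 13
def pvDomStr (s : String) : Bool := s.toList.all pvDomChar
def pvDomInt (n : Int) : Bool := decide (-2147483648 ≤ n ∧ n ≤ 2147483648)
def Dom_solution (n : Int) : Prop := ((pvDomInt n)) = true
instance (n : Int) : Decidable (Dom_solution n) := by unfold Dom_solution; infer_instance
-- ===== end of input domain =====

-- B replaces A's O(n) DP array with O(log n) fast doubling mod 1234567 (equal return values on n ≥ 1).

-- ===== PORT A =====
-- dp = [0]*(n+2); dp[1]=1; dp[2]=2; for i in range(3, n+1): dp[i]=dp[i-1]+dp[i-2]; return dp[n] % 1234567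
def solution (n : Int) : Int :=
  let dp : Array Int := Array.replicate (n + 2).toNat 0
  let dp := dp.setIfInBounds 1 1
  let dp := dp.setIfInBounds 2 2
  let dp :=
    if n ≥ 3 then
      (PySem.List.pyRange 3 (n + 1) 1).foldl
        (fun dp i => dp.setIfInBounds i.toNat (dp.getD (i - 1).toNat 0 + dp.getD (i - 2).toNat 0)) dp
    else dp
  PySem.Int.mod (dp.getD n.toNat 0) 1234567

-- ===== PORT B =====
-- fib_pair k = (F(k) % MOD, F(k+1) % MOD) by fast doubling (Source B's fib_pair)
def fibPair (k : Nat) : Int × Int :=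
  if h : k = 0 then (0, 1)
  else
    let p := fibPair (k / 2)
    let a := p.1
    let b := p.2
    let c := PySem.Int.mod (a * (2 * b - a)) 1234567
    let d := PySem.Int.mod (a * a + b * b) 1234567
    if k % 2 = 1 then (d, PySem.Int.mod (c + d) 1234567) else (c, d)
termination_by k
decreasing_by exact Nat.div_lt_self (Nat.pos_of_ne_zero h) one_lt_two

def solution_alt (n : Int) : Int := (fibPair (n + 1).toNat).1

-- ===== PRECONDITION & SPEC =====
-- A raises IndexError for every n ≤ 0 (dp has fewer than 3 cells), so those inputs are excluded.
def Pre_solution (n : Int) : Prop := 1 ≤ n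
instance (n : Int) : Decidable (Pre_solution n) := by unfold Pre_solution; infer_instance
def pvWitness_solution : Int := (5)

def Spec_solution (n : Int) (out : Int) : Prop := out = solution_alt n
instance (n : Int) (out : Int) : Decidable (Spec_solution n out) := by unfold Spec_solution; infer_instance

-- ===== CLAIM (what is proved, stated in full; the proofs are below) =====
def Claim_equal_solution : Prop := ∀ (n : Int), Dom_solution n → Pre_solution n → Spec_solution n (solution n)

-- ===== LEMMAS AND PROOFS =====

theorem fibPair_eq (k : Nat) :
    fibPair k = ((Nat.fib k : Int) % 1234567, (Nat.fib (k + 1) : Int) % 1234567) := by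
  induction k using Nat.strong_induction_on with
  | _ k ih =>
    rw [fibPair]
    by_cases h0 : k = 0
    · subst h0; simp
    · simp only [h0, dite_false]
      rw [ih (k / 2) (Nat.div_lt_self (Nat.pos_of_ne_zero h0) one_lt_two)]
      have hM : (0:Int) < 1234567 := by norm_num
      simp only [PySem.Int.mod_eq_emod_of_pos hM]
      set m := k / 2 with hm
      set A : Int := (Nat.fib m : Int) with hA
      set B : Int := (Nat.fib (m+1) : Int) with hB
      have hfib : Nat.fib m ≤ 2 * Nat.fib (m+1) :=
        le_trans (Nat.fib_le_fib_succ) (by omega)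
      have heven : (Nat.fib (2*m) : Int) = A * (2 * B - A) := by
        rw [Nat.fib_two_mul]; push_cast [hfib]; ring
      have hodd : (Nat.fib (2*m+1) : Int) = A * A + B * B := by
        rw [Nat.fib_two_mul_add_one]; push_cast; ring
      have rA : Int.ModEq 1234567 (A % 1234567) A := Int.emod_emod_of_dvd A dvd_rfl
      have rB : Int.ModEq 1234567 (B % 1234567) B := Int.emod_emod_of_dvd B dvd_rfl
      have hmc : (A % 1234567 * (2 * (B % 1234567) - A % 1234567)) % 1234567
          = (Nat.fib (2*m) : Int) % 1234567 := by
        rw [heven]; exact rA.mul (((Int.ModEq.refl 2).mul rB).sub rA)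
      have hmd : (A % 1234567 * (A % 1234567) + B % 1234567 * (B % 1234567)) % 1234567
          = (Nat.fib (2*m+1) : Int) % 1234567 := by
        rw [hodd]; exact (rA.mul rA).add (rB.mul rB)
      by_cases hpar : k % 2 = 1
      · have hk : k = 2*m + 1 := by omega
        simp only [hpar, if_true]
        have hsum : ((Nat.fib (2*m) : Int) % 1234567 + (Nat.fib (2*m+1) : Int) % 1234567) % 1234567
            = (Nat.fib (2*m+2) : Int) % 1234567 := by
          have hstep : Nat.fib (2*m+2) = Nat.fib (2*m) + Nat.fib (2*m+1) := by
            rw [Nat.fib_add_two]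
          have rC : Int.ModEq 1234567 ((Nat.fib (2*m) : Int) % 1234567) (Nat.fib (2*m) : Int) :=
            Int.emod_emod_of_dvd _ dvd_rfl
          have rD : Int.ModEq 1234567 ((Nat.fib (2*m+1) : Int) % 1234567) (Nat.fib (2*m+1) : Int) :=
            Int.emod_emod_of_dvd _ dvd_rfl
          rw [hstep]; push_cast
          exact rC.add rD
        rw [hmc, hmd, hsum, hk]
      · have hk : k = 2*m := by omega
        simp only [hpar, if_false]
        rw [hmc, hmd, hk]

theorem arrGetSetSelf (a : Array Int) (i : Nat) (v : Int) (h : i < a.size) :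
    (a.setIfInBounds i v)[i]? = some v := by
  simp [h]

theorem loop_inv (n : Int) (hn : 3 ≤ n) (k : Nat) (hk2 : 2 ≤ k) (hkn : (k : Int) ≤ n) :
    ((PySem.List.pyRange 3 ((k : Int) + 1) 1).foldl
        (fun dp i => dp.setIfInBounds i.toNat (dp.getD (i - 1).toNat 0 + dp.getD (i - 2).toNat 0))
        (((Array.replicate (n + 2).toNat (0 : Int)).setIfInBounds 1 1).setIfInBounds 2 2)).size = n.toNat + 2 ∧
    ((PySem.List.pyRange 3 ((k : Int) + 1) 1).foldl
        (fun dp i => dp.setIfInBounds i.toNat (dp.getD (i - 1).toNat 0 + dp.getD (i - 2).toNat 0))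
        (((Array.replicate (n + 2).toNat (0 : Int)).setIfInBounds 1 1).setIfInBounds 2 2)).getD (k - 1) 0
      = (Nat.fib k : Int) ∧
    ((PySem.List.pyRange 3 ((k : Int) + 1) 1).foldl
        (fun dp i => dp.setIfInBounds i.toNat (dp.getD (i - 1).toNat 0 + dp.getD (i - 2).toNat 0))
        (((Array.replicate (n + 2).toNat (0 : Int)).setIfInBounds 1 1).setIfInBounds 2 2)).getD k 0
      = (Nat.fib (k + 1) : Int) := by
  induction k with
  | zero => omega
  | succ k ih =>
    rcases Nat.lt_or_ge k 2 with h2 | h2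
    · have hk1 : k = 1 := by omega
      subst hk1
      have hnil : PySem.List.pyRange 3 (((2 : Nat) : Int) + 1) 1 = [] := by
        apply PySem.List.pyRange_one_eq_nil; norm_num
      rw [hnil]
      simp only [List.foldl_nil]
      refine ⟨by simp only [Array.size_setIfInBounds, Array.size_replicate]; omega, ?_, ?_⟩
      · have h1 : (((Array.replicate (n + 2).toNat (0 : Int)).setIfInBounds 1 1).setIfInBounds 2 2)[(1 : Nat)]?
            = some 1 := by
          rw [Array.getElem?_setIfInBounds_ne (by omega)]
          apply arrGetSetSelf
          rw [Array.size_replicate]; omega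
        rw [Array.getD_eq_getD_getElem?]
        norm_num [h1]
      · have h2' : (((Array.replicate (n + 2).toNat (0 : Int)).setIfInBounds 1 1).setIfInBounds 2 2)[(2 : Nat)]?
            = some 2 := by
          apply arrGetSetSelf
          rw [Array.size_setIfInBounds, Array.size_replicate]; omega
        rw [Array.getD_eq_getD_getElem?]
        norm_num [h2']
    · have hkn' : (k : Int) ≤ n := by push_cast at hkn; omega
      obtain ⟨hL, hprev, hcur⟩ := ih h2 hkn'
      set L := ((PySem.List.pyRange 3 ((k : Int) + 1) 1).foldl
        (fun dp i => dp.setIfInBounds i.toNat (dp.getD (i - 1).toNat 0 + dp.getD (i - 2).toNat 0))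
        (((Array.replicate (n + 2).toNat (0 : Int)).setIfInBounds 1 1).setIfInBounds 2 2)) with hLdef
      have hsplit : PySem.List.pyRange 3 (((k + 1 : Nat) : Int) + 1) 1
          = PySem.List.pyRange 3 ((k : Int) + 1) 1 ++ [(k : Int) + 1] := by
        have : (((k + 1 : Nat) : Int) + 1) = ((k : Int) + 1) + 1 := by push_cast; ring
        rw [this]
        exact PySem.List.pyRange_one_succ_right (by push_cast; omega)
      rw [hsplit, List.foldl_append]
      simp only [List.foldl_cons, List.foldl_nil, ← hLdef]
      have ht1 : ((k : Int) + 1).toNat = k + 1 := by omega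
      have ht2 : ((k : Int) + 1 - 1).toNat = k := by omega
      have ht3 : ((k : Int) + 1 - 2).toNat = k - 1 := by omega
      rw [ht1, ht2, ht3, hprev, hcur]
      refine ⟨by rw [Array.size_setIfInBounds, hL], ?_, ?_⟩
      · have hk1 : k + 1 - 1 = k := by omega
        rw [hk1, Array.getD_eq_getD_getElem?, Array.getElem?_setIfInBounds_ne (by omega),
          ← Array.getD_eq_getD_getElem?]
        exact hcur
      · have hset : (L.setIfInBounds (k + 1) ((Nat.fib (k + 1) : Int) + (Nat.fib k : Int)))[(k + 1 : Nat)]?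
            = some ((Nat.fib (k + 1) : Int) + (Nat.fib k : Int)) := by
          apply arrGetSetSelf
          rw [hL]; omega
        rw [Array.getD_eq_getD_getElem?, hset, Option.getD_some, Nat.fib_add_two]
        push_cast
        ring

theorem solution_eq_fib (n : Int) (hn : 1 ≤ n) :
    solution n = ((Nat.fib (n.toNat + 1) : Int)) % 1234567 := by
  rcases lt_or_ge n 3 with h3 | h3
  · interval_cases n <;> decide
  · unfold solution
    simp only []
    rw [if_pos h3]
    have hk2 : 2 ≤ n.toNat := by omega
    have hkn : ((n.toNat : Nat) : Int) ≤ n := by omega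
    obtain ⟨hL, hprev, hcur⟩ := loop_inv n h3 n.toNat hk2 hkn
    have hcast : ((n.toNat : Nat) : Int) + 1 = n + 1 := by omega
    rw [hcast] at hcur
    rw [hcur, PySem.Int.mod_eq_emod_of_pos (by norm_num)]

-- ===== VERDICT (by name: the statement is the Claim_ definition above) =====
theorem solution_spec : Claim_equal_solution := by
  intro n _ hn
  have hn' : 1 ≤ n := hn
  unfold Spec_solution solution_alt
  rw [fibPair_eq, solution_eq_fib n hn']
  have : (n + 1).toNat = n.toNat + 1 := by omega
  rw [this]
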